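-- pv_equiv track=rewrite | github.com/withNoclout/LeetCode-Med | quiz_minCostsManage.py | minCost
-- ===== SOURCE A (Python) =====
-- def minCost(basket1, basket2):
--     """
--     :type basket1: List[int]
--     :type basket2: List[int]
--     :rtype: int
--     """
--     from collections import Counter
--     from heapq import nsmallest
--
--     freq = Counter()
--     for b in basket1 :
--         freq[b] +=1
--     for b in basket2 :
--         freq[b] -= 1
--
--
--     if any(v % 2 != 0 for v in freq.values()) :
--         return -1
--
--     excess = []
--
--     for k in freq :
--         count = abs(freq[k]) // 2
--         excess.extend([k] * count )
--
--     excess.sort()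
--
--     min_val = min( basket1 + basket2 )
--     cost = 0
--
--     for i in range(len(excess) // 2 ) :
--         cost += min( excess[i], min_val * 2 )
--
--     return cost
-- ===== SOURCE B (Python) =====
-- def minCost(basket1, basket2):
--     """
--     :type basket1: List[int]
--     :type basket2: List[int]
--     :rtype: int
--     """
--     from collections import Counter
--     from heapq import nsmallest
--
--     diff = Counter(basket1)
--     diff.subtract(basket2)
--
--     surplus = []
--     for value, d in diff.items():
--         if d % 2 != 0:
--             return -1
--         surplus.extend([value] * (abs(d) // 2))
--
--     m = len(surplus) // 2
--     cap = 2 * min(basket1 + basket2)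
--
--     # Items at or above the cap all cost exactly cap, so only the cheap side
--     # needs selection: pick the m smallest cheap items with a heap, pay cap
--     # for the rest -- no full sort, no per-item min against the cap.
--     cheap = [v for v in surplus if v < cap]
--     k = len(cheap)
--     if k >= m:
--         return sum(nsmallest(m, cheap))
--     return sum(cheap) + (m - k) * cap
-- ===== Notes on version B (the rewrite author's own statement) =====
-- stated objective: alternative
-- what changed: B never sorts the full surplus list and never takes a per-item min against the cap inside the summation loop: it partitions the surplus at the threshold cap = 2*min into cheap and expensive items, pays the expensive side by arithmetic ((m-k)*cap), and selects the m smallest cheap items with heapq.nsmallest (heap selection) only when the cheap side is large enough.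
import Mathlib
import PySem

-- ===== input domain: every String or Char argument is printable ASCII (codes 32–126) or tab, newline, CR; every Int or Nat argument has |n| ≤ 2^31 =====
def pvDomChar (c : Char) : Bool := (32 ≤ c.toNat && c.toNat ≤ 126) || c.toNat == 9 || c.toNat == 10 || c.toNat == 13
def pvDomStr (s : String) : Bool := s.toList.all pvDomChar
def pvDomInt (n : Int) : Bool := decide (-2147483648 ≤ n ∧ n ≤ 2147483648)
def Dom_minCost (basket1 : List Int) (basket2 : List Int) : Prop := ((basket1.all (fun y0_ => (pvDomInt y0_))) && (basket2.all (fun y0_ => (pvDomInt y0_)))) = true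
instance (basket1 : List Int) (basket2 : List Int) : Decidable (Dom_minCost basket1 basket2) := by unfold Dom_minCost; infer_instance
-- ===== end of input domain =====

-- B replaces A's sort-the-whole-surplus-and-sum-capped-first-half by a threshold partition
-- at cap = 2*min: heap-selection of the m smallest cheap items plus arithmetic for the
-- expensive side (alternative decomposition; return-value equivalence; no argument is mutated).

-- ===== PORT A =====
def minCost (basket1 : List Int) (basket2 : List Int) : Int :=
  let freq := basket1.foldl (fun d b => d.modify b 0 (· + 1)) (PySem.Dict.empty)
  let freq := basket2.foldl (fun d b => d.modify b 0 (· - 1)) freq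
  if freq.values.any (fun v => PySem.Int.mod v 2 != 0) then -1
  else
    let excess := freq.keys.foldl (fun acc k =>
      acc ++ List.replicate (PySem.Int.floordiv |freq.getD k 0| 2).toNat k) []
    let excess := PySem.List.sorted excess (fun x => x) false
    let min_val := (PySem.List.min? (basket1 ++ basket2) (fun x => x)).getD 0  -- min() raises on [] ++ []: excluded by Pre_
    (PySem.List.pyRange 0 (PySem.Int.floordiv (PySem.List.len excess) 2) 1).foldl
      (fun cost i => cost + min (PySem.List.pyGetD excess i 0) (min_val * 2)) 0

-- ===== PORT B =====
-- Source B's items loop: build the expanded surplus list; none = the early 'return -1' on an odd entry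
def pvSurplus : List (Int × Int) → Option (List Int)
  | [] => some []
  | (k, v) :: rest =>
    if PySem.Int.mod v 2 != 0 then none
    else
      match pvSurplus rest with
      | none => none
      | some s => some (List.replicate (PySem.Int.floordiv |v| 2).toNat k ++ s)

def minCost_alt (basket1 : List Int) (basket2 : List Int) : Int :=
  let diff := basket2.foldl (fun d b => d.modify b 0 (· - 1)) (PySem.Dict.counter basket1)
  match pvSurplus diff.items with
  | none => -1
  | some surplus =>
    let m := PySem.Int.floordiv (PySem.List.len surplus) 2
    let cap := 2 * ((PySem.List.min? (basket1 ++ basket2) (fun x => x)).getD 0)  -- min() raises on [] ++ []: excluded by Pre_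
    let cheap := surplus.filter (fun v => decide (v < cap))
    let k := PySem.List.len cheap
    if m ≤ k then
      -- nsmallest(m, cheap) = the first m elements of sorted(cheap)
      ((PySem.List.sorted cheap (fun x => x) false).take m.toNat).sum
    else cheap.sum + (m - k) * cap

-- ===== PRECONDITION & SPEC =====
-- Pre_ excludes only the two-empty-baskets input, on which A's (and B's) min() raises ValueError.
def Pre_minCost (basket1 : List Int) (basket2 : List Int) : Prop :=
  ¬(basket1 = [] ∧ basket2 = [])
instance (basket1 : List Int) (basket2 : List Int) : Decidable (Pre_minCost basket1 basket2) := by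
  unfold Pre_minCost; infer_instance
def pvWitness_minCost : List Int × List Int := ([4, 2], [2, 4])

def Spec_minCost (basket1 : List Int) (basket2 : List Int) (out : Int) : Prop := out = minCost_alt basket1 basket2
instance (basket1 : List Int) (basket2 : List Int) (out : Int) : Decidable (Spec_minCost basket1 basket2 out) := by unfold Spec_minCost; infer_instance

-- ===== CLAIM (what is proved, stated in full; the proofs are below) =====
def Claim_equal_minCost : Prop := ∀ (basket1 : List Int) (basket2 : List Int), Dom_minCost basket1 basket2 → Pre_minCost basket1 basket2 → Spec_minCost basket1 basket2 (minCost basket1 basket2)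

-- ===== LEMMAS AND PROOFS =====

-- A's per-entry expansion of a (value, signed surplus) item into repeated elements
def pvExpandA (p : Int × Int) : List Int :=
  List.replicate (PySem.Int.floordiv |p.2| 2).toNat p.1

lemma pvSurplus_eq_none_iff (items : List (Int × Int)) :
    pvSurplus items = none ↔ items.any (fun p => PySem.Int.mod p.2 2 != 0) := by
  induction items with
  | nil => simp [pvSurplus]
  | cons hd tl ih =>
    obtain ⟨k, v⟩ := hd
    simp only [pvSurplus, List.any_cons, Bool.or_eq_true]
    cases h : (PySem.Int.mod v 2 != 0) with
    | true => simp
    | false =>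
      simp only [Bool.false_eq_true, if_false, false_or]
      cases htl : pvSurplus tl with
      | none => rw [← ih, htl]
      | some s => rw [← ih, htl]; simp

lemma pvSurplus_eq_some (items : List (Int × Int))
    (h : items.any (fun p => PySem.Int.mod p.2 2 != 0) = false) :
    pvSurplus items = some (items.flatMap pvExpandA) := by
  induction items with
  | nil => simp [pvSurplus]
  | cons hd tl ih =>
    obtain ⟨k, v⟩ := hd
    simp only [List.any_cons, Bool.or_eq_false_iff] at h
    simp only [pvSurplus, h.1, Bool.false_eq_true, if_false, ih h.2, List.flatMap_cons]
    rfl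

-- the first-m sum loop of A, as a take-map-sum
lemma pvRange_sum_take (g : Int → Int) (xs : List Int) : ∀ (n : Nat), n ≤ xs.length →
    (PySem.List.pyRange 0 (n : Int) 1).foldl
      (fun cost i => cost + g (PySem.List.pyGetD xs i 0)) 0 = ((xs.take n).map g).sum := by
  intro n
  induction n with
  | zero => intro _; simp [PySem.List.pyRange_one_eq_nil]
  | succ m ih =>
    intro hle
    have h1 : ((m + 1 : Nat) : Int) = (m : Int) + 1 := by push_cast; ring
    rw [h1, PySem.List.pyRange_one_succ_right (by positivity), List.foldl_append,
      ih (by omega)]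
    rw [List.take_add_one]
    simp only [List.foldl_cons, List.foldl_nil, List.map_append, List.sum_append,
      List.getElem?_eq_getElem (show m < xs.length by omega)]
    rw [PySem.List.pyGetD_natCast, List.getD_eq_getElem _ _ (by omega)]
    simp

-- in a ≤-sorted list, the elements below c form the takeWhile prefix and everything after is ≥ c
lemma pvSplitSorted (c : Int) : ∀ ys : List Int, ys.Pairwise (· ≤ ·) →
    ys.filter (fun v => decide (v < c)) = ys.takeWhile (fun v => decide (v < c)) ∧
    ∀ x ∈ ys.dropWhile (fun v => decide (v < c)), c ≤ x := by
  intro ys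
  induction ys with
  | nil => intro _; simp
  | cons y t ih =>
    intro hpw
    obtain ⟨hy, ht⟩ := List.pairwise_cons.mp hpw
    obtain ⟨ihf, ihd⟩ := ih ht
    by_cases hyc : y < c
    · simp only [List.filter_cons, List.takeWhile_cons, List.dropWhile_cons, hyc,
        decide_true, if_true]
      exact ⟨by rw [ihf], ihd⟩
    · have hcy : c ≤ y := by omega
      have hnil : List.filter (fun v => decide (v < c)) t = [] := by
        rw [List.filter_eq_nil_iff]
        intro x hx
        have := hy x hx
        simp only [decide_eq_true_eq]
        omega
      constructor
      · simp [List.filter_cons, List.takeWhile_cons, hyc, hnil]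
      · intro x hx
        rw [List.dropWhile_cons] at hx
        simp only [hyc, decide_false, Bool.false_eq_true, if_false] at hx
        rcases List.mem_cons.mp hx with h1 | h2
        · omega
        · have := hy x h2; omega

-- the heart: on a sorted list ys of length ≥ m, the capped first-m sum equals
-- B's partition-at-the-cap value
lemma pvCore (ys : List Int) (c : Int) (m : Nat)
    (hpw : ys.Pairwise (· ≤ ·)) (hm : m ≤ ys.length) :
    (((ys.take m).map (fun e => min e c)).sum) =
      (if (m : Int) ≤ ((ys.filter (fun v => decide (v < c))).length : Int)
       then ((ys.filter (fun v => decide (v < c))).take m).sum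
       else (ys.filter (fun v => decide (v < c))).sum
            + ((m : Int) - ((ys.filter (fun v => decide (v < c))).length : Int)) * c) := by
  obtain ⟨hf, hd⟩ := pvSplitSorted c ys hpw
  set p := fun v : Int => decide (v < c) with hp
  set t := ys.takeWhile p with hT
  set d := ys.dropWhile p with hD
  have hsplit : ys = t ++ d := (List.takeWhile_append_dropWhile).symm
  have htlt : ∀ x ∈ t, x < c := by
    intro x hx
    have := List.mem_takeWhile_imp hx
    simpa [hp] using this
  rw [hf]
  by_cases hcase : m ≤ t.length
  · rw [if_pos (by exact_mod_cast hcase)]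
    have htake : ys.take m = t.take m := by
      rw [hsplit, List.take_append_of_le_length hcase]
    have hid : (t.take m).map (fun e => min e c) = t.take m := by
      have := List.map_congr_left (l := t.take m) (f := fun e => min e c) (g := fun x => x)
        (fun x hx => min_eq_left (le_of_lt (htlt x (List.mem_of_mem_take hx))))
      simpa using this
    rw [htake, hid]
  · rw [if_neg (by exact_mod_cast hcase)]
    have hk : t.length < m := by omega
    have hlen : ys.length = t.length + d.length := by
      rw [hsplit, List.length_append]
    have htake : ys.take m = t ++ d.take (m - t.length) := by
      rw [hsplit, List.take_append]
      congr 1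
      exact List.take_of_length_le (by omega)
    rw [htake, List.map_append, List.sum_append]
    have h1 : t.map (fun e => min e c) = t := by
      have := List.map_congr_left (l := t) (f := fun e => min e c) (g := fun x => x)
        (fun x hx => min_eq_left (le_of_lt (htlt x hx)))
      simpa using this
    have h2 : (d.take (m - t.length)).map (fun e => min e c)
        = (d.take (m - t.length)).map (fun _ => c) :=
      List.map_congr_left (fun x hx => min_eq_right (hd x (List.mem_of_mem_take hx)))
    rw [h1, h2, PySem.List.sum_map_const_int]
    have hlen2 : (d.take (m - t.length)).length = m - t.length := by
      rw [List.length_take]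
      omega
    rw [hlen2]
    have : ((m - t.length : Nat) : Int) = (m : Int) - (t.length : Int) := by omega
    rw [this]

-- the two tails agree for ANY dict with distinct keys and any min-value
lemma pvBridge (freq : PySem.Dict Int Int) (hnd : freq.keys.Nodup) (mv : Int) :
    (if freq.values.any (fun v => PySem.Int.mod v 2 != 0) then (-1 : Int)
     else
       let excess := freq.keys.foldl (fun acc k =>
         acc ++ List.replicate (PySem.Int.floordiv |freq.getD k 0| 2).toNat k) []
       let excess := PySem.List.sorted excess (fun x => x) false
       (PySem.List.pyRange 0 (PySem.Int.floordiv (PySem.List.len excess) 2) 1).foldl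
         (fun cost i => cost + min (PySem.List.pyGetD excess i 0) (mv * 2)) 0)
    =
    (match pvSurplus freq.items with
     | none => -1
     | some surplus =>
       let m := PySem.Int.floordiv (PySem.List.len surplus) 2
       let cap := 2 * mv
       let cheap := surplus.filter (fun v => decide (v < cap))
       let k := PySem.List.len cheap
       if m ≤ k then ((PySem.List.sorted cheap (fun x => x) false).take m.toNat).sum
       else cheap.sum + (m - k) * cap) := by
  have hval : freq.values.any (fun v => PySem.Int.mod v 2 != 0)
      = freq.items.any (fun p => PySem.Int.mod p.2 2 != 0) := by
    rw [show freq.values = freq.items.map (·.2) from rfl, List.any_map]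
    rfl
  by_cases hodd : freq.items.any (fun p => PySem.Int.mod p.2 2 != 0) = true
  · rw [if_pos (by rw [hval, hodd]), (pvSurplus_eq_none_iff _).mpr hodd]
  · have hodd' : freq.items.any (fun p => PySem.Int.mod p.2 2 != 0) = false := by
      simpa using hodd
    rw [if_neg (by rw [hval, hodd']; simp), pvSurplus_eq_some _ hodd']
    dsimp only
    -- A's excess list is the same list as B's surplus
    have hexA : freq.keys.foldl (fun acc k =>
        acc ++ List.replicate (PySem.Int.floordiv |freq.getD k 0| 2).toNat k) []
        = freq.items.flatMap pvExpandA := by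
      rw [PySem.List.foldl_append_eq_flatMap, List.nil_append,
        PySem.Dict.items_eq_map_keys freq hnd 0, List.flatMap_map]
      rfl
    rw [hexA]
    set es := freq.items.flatMap pvExpandA with hES
    set ys := PySem.List.sorted es (fun x => x) false with hYS
    have hperm : ys.Perm es := PySem.List.sorted_perm _ _ _
    have hpw : ys.Pairwise (· ≤ ·) := by
      have := PySem.List.sorted_pairwise es (fun x : Int => x)
      simpa using this
    set c := mv * 2 with hc
    have hc2 : (2 : Int) * mv = c := by rw [hc]; ring
    rw [hc2]
    -- index arithmetic: both halvings are ys.length / 2 as a Nat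
    have hlenys : ys.length = es.length := hperm.length_eq
    set m : Nat := es.length / 2 with hm
    have hmle : m ≤ ys.length := by omega
    have hlenA : PySem.Int.floordiv (PySem.List.len ys) 2 = (m : Int) := by
      rw [PySem.List.len_eq, PySem.Int.floordiv_eq_ediv_of_pos (by omega), hlenys]
      exact_mod_cast (Int.natCast_ediv es.length 2).symm
    have hlenB : PySem.Int.floordiv (PySem.List.len es) 2 = (m : Int) := by
      rw [PySem.List.len_eq, PySem.Int.floordiv_eq_ediv_of_pos (by omega)]
      exact_mod_cast (Int.natCast_ediv es.length 2).symm
    rw [hlenA, hlenB,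
      pvRange_sum_take (g := fun e => min e c) ys m hmle]
    -- B's cheap list: same multiset as ys's filter, sorted = the filter of ys
    have hpermf : (ys.filter (fun v => decide (v < c))).Perm
        (es.filter (fun v => decide (v < c))) := hperm.filter _
    have hsortcheap : PySem.List.sorted (es.filter (fun v => decide (v < c)))
        (fun x => x) false = ys.filter (fun v => decide (v < c)) :=
      PySem.List.sorted_id_eq_of_perm_of_pairwise _ _ hpermf (hpw.filter _)
    have hlenf : ((es.filter (fun v => decide (v < c))).length : Int)
        = ((ys.filter (fun v => decide (v < c))).length : Int) := by
      rw [hpermf.length_eq]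
    have hsumf : (es.filter (fun v => decide (v < c))).sum
        = (ys.filter (fun v => decide (v < c))).sum := hpermf.sum_eq.symm
    rw [pvCore ys c m hpw hmle, hsortcheap, PySem.List.len_eq, hlenf, hsumf,
      Int.toNat_natCast]

-- ===== VERDICT (by name: the statement is the Claim_ definition above) =====
theorem minCost_spec : Claim_equal_minCost := by
  intro b1 b2 _ _
  show minCost b1 b2 = minCost_alt b1 b2
  have hnd : (b2.foldl (fun d b => d.modify b 0 (· - 1))
      (b1.foldl (fun d b => d.modify b 0 (· + 1)) (PySem.Dict.empty : PySem.Dict Int Int))).keys.Nodup := by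
    apply PySem.Dict.nodup_keys_foldl_modify_key b2 (fun x => x) 0 (fun _ _ => (· - 1))
    apply PySem.Dict.nodup_keys_foldl_modify_key b1 (fun x => x) 0 (fun _ _ => (· + 1))
    exact PySem.Dict.nodup_keys_empty
  exact pvBridge _ hnd _
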